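-- pv_equiv track=rewrite | github.com/saetar/Cognition-Final-Project | tweets.py | get_hashtag
-- ===== SOURCE A (Python) =====
-- def get_hashtag(text):
--     hashtag = ""
--     in_hashtag = False
--     for letter in text:
--         if in_hashtag:
--             if letter == " ":
--                 in_hashtag = False
--                 break
--             else:
--                 hashtag += letter
--         if letter == "#":
--             in_hashtag = True
--
--     return hashtag
-- ===== SOURCE B (Python) =====
-- def get_hashtag(text):
--     idx = text.find('#')
--     if idx == -1:
--         return ""
--     rest = text[idx + 1:]
--     s = rest.find(' ')
--     return rest if s == -1 else rest[:s]
-- ===== Notes on version B (the rewrite author's own statement) =====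
-- stated objective: simpler
-- what changed: Replaced A's per-character state machine (an in-hashtag flag, char-by-char accumulation, break on space) with index arithmetic: find the first hash sign, slice off everything after it, and cut that slice at the first literal space it contains.
import Mathlib
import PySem

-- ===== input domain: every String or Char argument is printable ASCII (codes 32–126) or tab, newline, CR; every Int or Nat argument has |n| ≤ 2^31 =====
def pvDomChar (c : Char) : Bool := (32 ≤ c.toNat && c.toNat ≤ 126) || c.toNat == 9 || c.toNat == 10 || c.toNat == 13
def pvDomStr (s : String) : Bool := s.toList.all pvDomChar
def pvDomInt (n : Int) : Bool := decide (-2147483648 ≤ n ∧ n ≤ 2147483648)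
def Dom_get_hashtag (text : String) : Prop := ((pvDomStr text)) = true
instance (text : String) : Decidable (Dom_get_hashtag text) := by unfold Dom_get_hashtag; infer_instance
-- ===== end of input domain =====

-- B replaces A's per-character state machine (in_hashtag flag with break) by find('#') + slice + find(' ') + slice; objective: simpler.

-- ===== PORT A =====
-- A's loop: state (hashtag, in_hashtag); inside a hashtag a space breaks, otherwise the letter is appended; '#' switches the flag on.
def gh_loop : List Char → List Char → Bool → List Char
  | [], acc, _ => acc
  | letter :: rest, acc, inH =>
    if inH then
      if letter = ' ' then acc
      else gh_loop rest (acc ++ [letter]) (if letter = '#' then true else inH)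
    else gh_loop rest acc (if letter = '#' then true else inH)

def get_hashtag (text : String) : String :=
  String.ofList (gh_loop text.toList [] false)

-- ===== PORT B =====
def get_hashtag_alt (text : String) : String :=
  let idx := PySem.Str.find text "#"
  if idx = -1 then ""
  else
    let rest := PySem.Str.slice text (some (idx + 1)) none
    let s := PySem.Str.find rest " "
    if s = -1 then rest else PySem.Str.slice rest none (some s)

-- ===== PRECONDITION & SPEC =====
def Spec_get_hashtag (text : String) (out : String) : Prop := out = get_hashtag_alt text
instance (text : String) (out : String) : Decidable (Spec_get_hashtag text out) := by unfold Spec_get_hashtag; infer_instance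

-- ===== CLAIM (what is proved, stated in full; the proofs are below) =====
def Claim_equal_get_hashtag : Prop := ∀ (text : String), Dom_get_hashtag text → Spec_get_hashtag text (get_hashtag text)

-- ===== LEMMAS AND PROOFS =====

-- find cs [a] = -1 means a does not occur
theorem gh_find_neg (cs : List Char) (a : Char) :
    PySem.Chars.find cs [a] = -1 ↔ a ∉ cs := by
  rw [PySem.Chars.find_eq_neg_one_iff, List.singleton_infix_iff]

-- find cs [a] ≥ 0 points at the first occurrence of a
theorem gh_find_pos (cs : List Char) (a : Char) (h : PySem.Chars.find cs [a] ≠ -1) :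
    (PySem.Chars.find cs [a]).toNat < cs.length ∧
    cs[(PySem.Chars.find cs [a]).toNat]? = some a ∧
    ∀ i < (PySem.Chars.find cs [a]).toNat, cs[i]? ≠ some a := by
  have hge : 0 ≤ PySem.Chars.find cs [a] := by
    rw [PySem.Chars.find_nonneg_iff]
    by_contra hc
    exact h ((PySem.Chars.find_eq_neg_one_iff cs [a]).mpr hc)
  obtain ⟨hpre, hmin⟩ := PySem.Chars.find_spec hge
  have hhead : cs[(PySem.Chars.find cs [a]).toNat]? = some a := by
    rw [← List.head?_drop]
    rcases hpre with ⟨t, ht⟩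
    rw [← ht]; rfl
  have hlen : (PySem.Chars.find cs [a]).toNat < cs.length := by
    by_contra hlen
    rw [List.getElem?_eq_none (Nat.le_of_not_lt hlen)] at hhead
    simp at hhead
  refine ⟨hlen, hhead, ?_⟩
  intro i hi hia
  have hilt : i < cs.length := Nat.lt_trans hi hlen
  refine hmin i hi ⟨cs.drop (i + 1), ?_⟩
  rw [List.drop_eq_getElem_cons hilt]
  rw [List.getElem?_eq_getElem hilt] at hia
  simp [Option.some.inj hia]

-- first-occurrence index turns drop into dropWhile
theorem gh_drop_eq_dropWhile (a : Char) :
    ∀ (cs : List Char) (k : Nat), cs[k]? = some a → (∀ i < k, cs[i]? ≠ some a) →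
      cs.drop k = cs.dropWhile (· != a)
  | [], k, h, _ => by simp at h
  | c :: cs, 0, h, _ => by
    simp at h
    simp [h]
  | c :: cs, k + 1, h, hmin => by
    have hc : c ≠ a := by
      have := hmin 0 (Nat.succ_pos k)
      simpa using this
    rw [List.drop_succ_cons, List.dropWhile_cons]
    simp only [bne_iff_ne, ne_eq, hc, not_false_eq_true, if_pos]
    exact gh_drop_eq_dropWhile a cs k (by simpa using h)
      (fun i hi => by simpa using hmin (i + 1) (Nat.succ_lt_succ hi))

-- first-occurrence index turns take into takeWhile
theorem gh_take_eq_takeWhile (a : Char) :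
    ∀ (cs : List Char) (k : Nat), cs[k]? = some a → (∀ i < k, cs[i]? ≠ some a) →
      cs.take k = cs.takeWhile (· != a)
  | [], k, h, _ => by simp at h
  | c :: cs, 0, h, _ => by
    simp at h
    simp [h]
  | c :: cs, k + 1, h, hmin => by
    have hc : c ≠ a := by
      have := hmin 0 (Nat.succ_pos k)
      simpa using this
    rw [List.take_succ_cons, List.takeWhile_cons]
    simp only [bne_iff_ne, ne_eq, hc, not_false_eq_true, if_pos]
    rw [gh_take_eq_takeWhile a cs k (by simpa using h)
      (fun i hi => by simpa using hmin (i + 1) (Nat.succ_lt_succ hi))]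

-- absent character: dropWhile eats everything, takeWhile keeps everything
theorem gh_dropWhile_of_not_mem (a : Char) :
    ∀ (cs : List Char), a ∉ cs → cs.dropWhile (· != a) = []
  | [], _ => rfl
  | c :: cs, h => by
    have hc : c ≠ a := fun hca => h (hca ▸ List.mem_cons_self)
    rw [List.dropWhile_cons]
    simp only [bne_iff_ne, ne_eq, hc, not_false_eq_true, if_pos]
    exact gh_dropWhile_of_not_mem a cs (fun hm => h (List.mem_cons_of_mem c hm))

theorem gh_takeWhile_of_not_mem (a : Char) :
    ∀ (cs : List Char), a ∉ cs → cs.takeWhile (· != a) = cs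
  | [], _ => rfl
  | c :: cs, h => by
    have hc : c ≠ a := fun hca => h (hca ▸ List.mem_cons_self)
    rw [List.takeWhile_cons]
    simp only [bne_iff_ne, ne_eq, hc, not_false_eq_true, if_pos]
    rw [gh_takeWhile_of_not_mem a cs (fun hm => h (List.mem_cons_of_mem c hm))]

-- ofList inverts toList
theorem pv_ofList_toList (s : String) : String.ofList s.toList = s := by simp

-- A's loop once inside a hashtag: collect until the first space
theorem gh_loop_true : ∀ (cs acc : List Char),
    gh_loop cs acc true = acc ++ cs.takeWhile (· != ' ')
  | [], acc => by simp [gh_loop]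
  | c :: cs, acc => by
    rw [gh_loop]
    by_cases hc : c = ' '
    · simp [hc]
    · rw [if_neg hc]
      simp only [reduceIte, ite_self]
      rw [gh_loop_true cs (acc ++ [c]), List.takeWhile_cons]
      simp [hc]

-- A's loop before any '#': skip to the first '#', then collect
theorem gh_loop_false : ∀ (cs : List Char),
    gh_loop cs [] false = ((cs.dropWhile (· != '#')).drop 1).takeWhile (· != ' ')
  | [] => by simp [gh_loop]
  | c :: cs => by
    rw [gh_loop]
    by_cases hc : c = '#'
    · simp only [if_neg Bool.false_ne_true, hc, if_pos]
      rw [gh_loop_true cs [], List.dropWhile_cons]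
      simp
    · rw [if_neg Bool.false_ne_true, if_neg hc]
      rw [gh_loop_false cs, List.dropWhile_cons]
      simp [hc]

-- ===== VERDICT (by name: the statement is the Claim_ definition above) =====
theorem get_hashtag_spec : Claim_equal_get_hashtag := by
  intro text _
  unfold Spec_get_hashtag get_hashtag get_hashtag_alt
  rw [gh_loop_false]
  simp only [PySem.Str.find_eq]
  have hhash : "#".toList = ['#'] := rfl
  have hspace : " ".toList = [' '] := rfl
  rw [hhash, hspace]
  set cs := text.toList with hcs
  by_cases hf : PySem.Chars.find cs ['#'] = -1
  · rw [if_pos hf]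
    have hnm : '#' ∉ cs := (gh_find_neg cs '#').mp hf
    rw [gh_dropWhile_of_not_mem '#' cs hnm]
    rfl
  · rw [if_neg hf]
    obtain ⟨hlt, hget, hmin⟩ := gh_find_pos cs '#' hf
    have hge : 0 ≤ PySem.Chars.find cs ['#'] := by
      rw [PySem.Chars.find_nonneg_iff, List.singleton_infix_iff]
      exact List.mem_of_getElem? hget
    set k := (PySem.Chars.find cs ['#']).toNat with hk
    -- the slice text[idx+1:] is drop (k+1)
    have hslice : (PySem.Str.slice text (some (PySem.Chars.find cs ['#'] + 1)) none).toList
        = cs.drop (k + 1) := by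
      simp only [PySem.Str.slice, String.toList_ofList, PySem.Chars.slice_eq_listSlice, ← hcs]
      rw [PySem.List.slice_from cs (by omega)]
      congr 1
      omega
    set w := PySem.Str.slice text (some (PySem.Chars.find cs ['#'] + 1)) none with hw
    have hdrop : cs.drop (k + 1) = (cs.dropWhile (· != '#')).drop 1 := by
      rw [← gh_drop_eq_dropWhile '#' cs k hget hmin, List.drop_drop]
    set rest := cs.drop (k + 1) with hrest
    rw [hslice]
    by_cases hs : PySem.Chars.find rest [' '] = -1
    · rw [if_pos hs]
      have hnm : ' ' ∉ rest := (gh_find_neg rest ' ').mp hs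
      rw [← hdrop, gh_takeWhile_of_not_mem ' ' rest hnm, ← hslice]
      exact pv_ofList_toList _
    · rw [if_neg hs]
      obtain ⟨_, hget2, hmin2⟩ := gh_find_pos rest ' ' hs
      have hge2 : 0 ≤ PySem.Chars.find rest [' '] := by
        rw [PySem.Chars.find_nonneg_iff, List.singleton_infix_iff]
        exact List.mem_of_getElem? hget2
      simp only [PySem.Str.slice, PySem.Chars.slice_eq_listSlice]
      rw [hslice, PySem.List.slice_to rest hge2,
        gh_take_eq_takeWhile ' ' rest _ hget2 hmin2, hdrop]
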